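-- pv_equiv track=rewrite | github.com/cristianemoyano/cloudnap | app/services/huawei_cloud_service.py | _determine_cluster_status
-- ===== SOURCE A (Python) =====
-- from typing import Dict, List, Optional, Any
--
-- def _determine_cluster_status(instance_statuses: List[str]) -> str:
--     """Determine cluster status based on instance statuses."""
--     if not instance_statuses:
--         return "unknown"
--
--     # Check for error states first
--     if any(status == "ERROR" for status in instance_statuses):
--         return "error"
--
--     # Check for transitional states
--     transitional_states = {
--         "BUILD", "REBOOT", "HARD_REBOOT", "MIGRATING", "RESIZE",
--         "VERIFY_RESIZE", "REVERT_RESIZE", "PASSWORD", "REBUILD",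
--         "RESCUE", "UNRESCUE"
--     }
--
--     if any(status in transitional_states for status in instance_statuses):
--         return "transitioning"
--
--     # Check for powering off/on states
--     if any(status in ["powering-off", "stopping", "POWERING_OFF", "STOPPING"] for status in instance_statuses):
--         return "stopping"
--
--     if any(status in ["powering-on", "starting", "POWERING_ON", "STARTING"] for status in instance_statuses):
--         return "starting"
--
--     # Check for suspended/paused states
--     if any(status in ["SUSPENDED", "PAUSED", "SHELVED", "SHELVED_OFFLOADED"] for status in instance_statuses):
--         return "stopped"
--
--     # Check for final states
--     if all(status in ["ACTIVE", "active"] for status in instance_statuses):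
--         return "running"
--     elif all(status in ["SHUTOFF", "shutoff"] for status in instance_statuses):
--         return "stopped"
--     elif any(status in ["ACTIVE", "active"] for status in instance_statuses):
--         return "partial"
--     else:
--         return "unknown"
-- ===== SOURCE B (Python) =====
-- # Table-driven single pass: map each status to a category, then decide by precedence.
-- _CATEGORY = {
--     "ERROR": "error",
--     "BUILD": "transitional", "REBOOT": "transitional", "HARD_REBOOT": "transitional",
--     "MIGRATING": "transitional", "RESIZE": "transitional", "VERIFY_RESIZE": "transitional",
--     "REVERT_RESIZE": "transitional", "PASSWORD": "transitional", "REBUILD": "transitional",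
--     "RESCUE": "transitional", "UNRESCUE": "transitional",
--     "powering-off": "stopping", "stopping": "stopping", "POWERING_OFF": "stopping", "STOPPING": "stopping",
--     "powering-on": "starting", "starting": "starting", "POWERING_ON": "starting", "STARTING": "starting",
--     "SUSPENDED": "suspended", "PAUSED": "suspended", "SHELVED": "suspended", "SHELVED_OFFLOADED": "suspended",
--     "ACTIVE": "active", "active": "active",
--     "SHUTOFF": "shutoff", "shutoff": "shutoff",
-- }
--
-- def _determine_cluster_status(instance_statuses):
--     """Determine cluster status based on instance statuses."""
--     cats = {_CATEGORY.get(s, "other") for s in instance_statuses}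
--     if not cats:
--         return "unknown"
--     if "error" in cats:
--         return "error"
--     if "transitional" in cats:
--         return "transitioning"
--     if "stopping" in cats:
--         return "stopping"
--     if "starting" in cats:
--         return "starting"
--     if "suspended" in cats:
--         return "stopped"
--     if cats == {"active"}:
--         return "running"
--     if cats == {"shutoff"}:
--         return "stopped"
--     if "active" in cats:
--         return "partial"
--     return "unknown"
-- ===== Notes on version B (the rewrite author's own statement) =====
-- stated objective: simpler
-- what changed: A's eight sequential any/all scans over the status list are replaced by one table-driven pass that maps each status through a category dict into a set of categories, followed by a single precedence decision on that set.
import Mathlib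
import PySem

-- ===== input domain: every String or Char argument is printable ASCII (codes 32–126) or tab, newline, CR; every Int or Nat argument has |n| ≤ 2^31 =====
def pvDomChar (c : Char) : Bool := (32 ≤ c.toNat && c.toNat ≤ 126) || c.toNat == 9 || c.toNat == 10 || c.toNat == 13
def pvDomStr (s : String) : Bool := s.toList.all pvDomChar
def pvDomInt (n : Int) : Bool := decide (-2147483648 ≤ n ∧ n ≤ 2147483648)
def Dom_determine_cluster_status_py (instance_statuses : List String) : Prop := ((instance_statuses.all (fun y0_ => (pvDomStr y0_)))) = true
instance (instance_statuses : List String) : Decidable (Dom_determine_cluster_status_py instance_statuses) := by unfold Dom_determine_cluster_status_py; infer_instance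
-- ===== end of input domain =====

-- B replaces A's eight separate scans by one table-driven pass collecting the set of status
-- categories, followed by a single precedence decision (objective: simpler decomposition).

-- ===== PORT A =====
def pvTransitionalStates : PySem.Set String :=
  PySem.Set.ofList ["BUILD", "REBOOT", "HARD_REBOOT", "MIGRATING", "RESIZE",
    "VERIFY_RESIZE", "REVERT_RESIZE", "PASSWORD", "REBUILD", "RESCUE", "UNRESCUE"]

def determine_cluster_status_py (instance_statuses : List String) : String :=
  if instance_statuses = [] then "unknown"
  else if instance_statuses.any (fun status => status == "ERROR") then "error"
  else if instance_statuses.any (fun status => pvTransitionalStates.contains status) then "transitioning"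
  else if instance_statuses.any (fun status => ["powering-off", "stopping", "POWERING_OFF", "STOPPING"].contains status) then "stopping"
  else if instance_statuses.any (fun status => ["powering-on", "starting", "POWERING_ON", "STARTING"].contains status) then "starting"
  else if instance_statuses.any (fun status => ["SUSPENDED", "PAUSED", "SHELVED", "SHELVED_OFFLOADED"].contains status) then "stopped"
  else if instance_statuses.all (fun status => ["ACTIVE", "active"].contains status) then "running"
  else if instance_statuses.all (fun status => ["SHUTOFF", "shutoff"].contains status) then "stopped"
  else if instance_statuses.any (fun status => ["ACTIVE", "active"].contains status) then "partial"
  else "unknown"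

-- ===== PORT B =====
def pvCategory : PySem.Dict String String := PySem.Dict.ofList [("ERROR", "error"), ("BUILD", "transitional"), ("REBOOT", "transitional"), ("HARD_REBOOT", "transitional"), ("MIGRATING", "transitional"), ("RESIZE", "transitional"), ("VERIFY_RESIZE", "transitional"), ("REVERT_RESIZE", "transitional"), ("PASSWORD", "transitional"), ("REBUILD", "transitional"), ("RESCUE", "transitional"), ("UNRESCUE", "transitional"), ("powering-off", "stopping"), ("stopping", "stopping"), ("POWERING_OFF", "stopping"), ("STOPPING", "stopping"), ("powering-on", "starting"), ("starting", "starting"), ("POWERING_ON", "starting"), ("STARTING", "starting"), ("SUSPENDED", "suspended"), ("PAUSED", "suspended"), ("SHELVED", "suspended"), ("SHELVED_OFFLOADED", "suspended"), ("ACTIVE", "active"), ("active", "active"), ("SHUTOFF", "shutoff"), ("shutoff", "shutoff")]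

-- _CATEGORY.get(s, "other")
def pvCatOf (s : String) : String := pvCategory.getD s "other"

-- the set comprehension {_CATEGORY.get(s, "other") for s in instance_statuses}
def pvCats (instance_statuses : List String) : PySem.Set String :=
  PySem.Set.ofList (instance_statuses.map pvCatOf)

def determine_cluster_status_py_alt (instance_statuses : List String) : String :=
  if pvCats instance_statuses = [] then "unknown"
  else if (pvCats instance_statuses).contains "error" then "error"
  else if (pvCats instance_statuses).contains "transitional" then "transitioning"
  else if (pvCats instance_statuses).contains "stopping" then "stopping"
  else if (pvCats instance_statuses).contains "starting" then "starting"
  else if (pvCats instance_statuses).contains "suspended" then "stopped"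
  -- Python's `cats == {"active"}` is set equality: PySem.Set.equal
  else if PySem.Set.equal (pvCats instance_statuses) ["active"] then "running"
  else if PySem.Set.equal (pvCats instance_statuses) ["shutoff"] then "stopped"
  else if (pvCats instance_statuses).contains "active" then "partial"
  else "unknown"

-- ===== PRECONDITION & SPEC =====
def Spec_determine_cluster_status_py (instance_statuses : List String) (out : String) : Prop := out = determine_cluster_status_py_alt instance_statuses
instance (instance_statuses : List String) (out : String) : Decidable (Spec_determine_cluster_status_py instance_statuses out) := by unfold Spec_determine_cluster_status_py; infer_instance

-- ===== CLAIM (what is proved, stated in full; the proofs are below) =====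
def Claim_equal_determine_cluster_status_py : Prop := ∀ (instance_statuses : List String), Dom_determine_cluster_status_py instance_statuses → Spec_determine_cluster_status_py instance_statuses (determine_cluster_status_py instance_statuses)

-- ===== LEMMAS AND PROOFS =====

lemma pvCategory_mk : pvCategory = PySem.Dict.mk [("ERROR", "error"), ("BUILD", "transitional"), ("REBOOT", "transitional"), ("HARD_REBOOT", "transitional"), ("MIGRATING", "transitional"), ("RESIZE", "transitional"), ("VERIFY_RESIZE", "transitional"), ("REVERT_RESIZE", "transitional"), ("PASSWORD", "transitional"), ("REBUILD", "transitional"), ("RESCUE", "transitional"), ("UNRESCUE", "transitional"), ("powering-off", "stopping"), ("stopping", "stopping"), ("POWERING_OFF", "stopping"), ("STOPPING", "stopping"), ("powering-on", "starting"), ("starting", "starting"), ("POWERING_ON", "starting"), ("STARTING", "starting"), ("SUSPENDED", "suspended"), ("PAUSED", "suspended"), ("SHELVED", "suspended"), ("SHELVED_OFFLOADED", "suspended"), ("ACTIVE", "active"), ("active", "active"), ("SHUTOFF", "shutoff"), ("shutoff", "shutoff")] := rfl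

lemma pvCatOf_cases (s : String) :
    pvCatOf s = "other" ∨ s ∈ ["ERROR", "BUILD", "REBOOT", "HARD_REBOOT", "MIGRATING", "RESIZE", "VERIFY_RESIZE", "REVERT_RESIZE", "PASSWORD", "REBUILD", "RESCUE", "UNRESCUE", "powering-off", "stopping", "POWERING_OFF", "STOPPING", "powering-on", "starting", "POWERING_ON", "STARTING", "SUSPENDED", "PAUSED", "SHELVED", "SHELVED_OFFLOADED", "ACTIVE", "active", "SHUTOFF", "shutoff"] := by
  cases hc : pvCategory.contains s
  · left
    exact PySem.Dict.getD_of_not_contains pvCategory "other" hc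
  · right
    have hk := (PySem.Dict.contains_iff_mem_keys pvCategory s).mp hc
    simpa [pvCategory_mk, PySem.Dict.keys_mk] using hk

lemma cat_error (s : String) : pvCatOf s = "error" ↔ (s = "ERROR") := by
  constructor
  · intro h
    rcases pvCatOf_cases s with ho | hk
    · rw [h] at ho; exact absurd ho (by decide)
    · fin_cases hk <;> (revert h; decide)
  · intro h
    rcases h with rfl <;> decide

lemma cat_transitional (s : String) : pvCatOf s = "transitional" ↔ (s = "BUILD" ∨ s = "REBOOT" ∨ s = "HARD_REBOOT" ∨ s = "MIGRATING" ∨ s = "RESIZE" ∨ s = "VERIFY_RESIZE" ∨ s = "REVERT_RESIZE" ∨ s = "PASSWORD" ∨ s = "REBUILD" ∨ s = "RESCUE" ∨ s = "UNRESCUE") := by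
  constructor
  · intro h
    rcases pvCatOf_cases s with ho | hk
    · rw [h] at ho; exact absurd ho (by decide)
    · fin_cases hk <;> (revert h; decide)
  · intro h
    rcases h with rfl | rfl | rfl | rfl | rfl | rfl | rfl | rfl | rfl | rfl | rfl <;> decide

lemma cat_stopping (s : String) : pvCatOf s = "stopping" ↔ (s = "powering-off" ∨ s = "stopping" ∨ s = "POWERING_OFF" ∨ s = "STOPPING") := by
  constructor
  · intro h
    rcases pvCatOf_cases s with ho | hk
    · rw [h] at ho; exact absurd ho (by decide)
    · fin_cases hk <;> (revert h; decide)
  · intro h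
    rcases h with rfl | rfl | rfl | rfl <;> decide

lemma cat_starting (s : String) : pvCatOf s = "starting" ↔ (s = "powering-on" ∨ s = "starting" ∨ s = "POWERING_ON" ∨ s = "STARTING") := by
  constructor
  · intro h
    rcases pvCatOf_cases s with ho | hk
    · rw [h] at ho; exact absurd ho (by decide)
    · fin_cases hk <;> (revert h; decide)
  · intro h
    rcases h with rfl | rfl | rfl | rfl <;> decide

lemma cat_suspended (s : String) : pvCatOf s = "suspended" ↔ (s = "SUSPENDED" ∨ s = "PAUSED" ∨ s = "SHELVED" ∨ s = "SHELVED_OFFLOADED") := by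
  constructor
  · intro h
    rcases pvCatOf_cases s with ho | hk
    · rw [h] at ho; exact absurd ho (by decide)
    · fin_cases hk <;> (revert h; decide)
  · intro h
    rcases h with rfl | rfl | rfl | rfl <;> decide

lemma cat_active (s : String) : pvCatOf s = "active" ↔ (s = "ACTIVE" ∨ s = "active") := by
  constructor
  · intro h
    rcases pvCatOf_cases s with ho | hk
    · rw [h] at ho; exact absurd ho (by decide)
    · fin_cases hk <;> (revert h; decide)
  · intro h
    rcases h with rfl | rfl <;> decide

lemma cat_shutoff (s : String) : pvCatOf s = "shutoff" ↔ (s = "SHUTOFF" ∨ s = "shutoff") := by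
  constructor
  · intro h
    rcases pvCatOf_cases s with ho | hk
    · rw [h] at ho; exact absurd ho (by decide)
    · fin_cases hk <;> (revert h; decide)
  · intro h
    rcases h with rfl | rfl <;> decide

lemma pvCats_ne_nil (xs : List String) (h : xs ≠ []) : pvCats xs ≠ [] := by
  cases xs with
  | nil => exact absurd rfl h
  | cons a t => simp [pvCats, PySem.Set.ofList_cons]

lemma cond_error (xs : List String) :
    (pvCats xs).contains "error" = xs.any (fun status => status == "ERROR") := by
  rw [Bool.eq_iff_iff]
  simp [pvCats, PySem.Set.mem_ofList, List.mem_map, cat_error]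

lemma cond_trans (xs : List String) :
    (pvCats xs).contains "transitional" = xs.any (fun status => pvTransitionalStates.contains status) := by
  rw [Bool.eq_iff_iff]
  simp [pvCats, PySem.Set.mem_ofList, List.mem_map, cat_transitional,
    show pvTransitionalStates = ["BUILD", "REBOOT", "HARD_REBOOT", "MIGRATING", "RESIZE",
      "VERIFY_RESIZE", "REVERT_RESIZE", "PASSWORD", "REBUILD", "RESCUE", "UNRESCUE"] from rfl]

lemma cond_stopping (xs : List String) :
    (pvCats xs).contains "stopping" = xs.any (fun status => ["powering-off", "stopping", "POWERING_OFF", "STOPPING"].contains status) := by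
  rw [Bool.eq_iff_iff]
  simp [pvCats, PySem.Set.mem_ofList, List.mem_map, cat_stopping]

lemma cond_starting (xs : List String) :
    (pvCats xs).contains "starting" = xs.any (fun status => ["powering-on", "starting", "POWERING_ON", "STARTING"].contains status) := by
  rw [Bool.eq_iff_iff]
  simp [pvCats, PySem.Set.mem_ofList, List.mem_map, cat_starting]

lemma cond_suspended (xs : List String) :
    (pvCats xs).contains "suspended" = xs.any (fun status => ["SUSPENDED", "PAUSED", "SHELVED", "SHELVED_OFFLOADED"].contains status) := by
  rw [Bool.eq_iff_iff]
  simp [pvCats, PySem.Set.mem_ofList, List.mem_map, cat_suspended]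

lemma cond_active_any (xs : List String) :
    (pvCats xs).contains "active" = xs.any (fun status => ["ACTIVE", "active"].contains status) := by
  rw [Bool.eq_iff_iff]
  simp [pvCats, PySem.Set.mem_ofList, List.mem_map, cat_active]

lemma cond_running (xs : List String) (h : xs ≠ []) :
    PySem.Set.equal (pvCats xs) ["active"] = xs.all (fun status => ["ACTIVE", "active"].contains status) := by
  rw [Bool.eq_iff_iff, PySem.Set.equal_iff]
  simp only [pvCats, PySem.Set.mem_ofList, List.mem_map, List.all_eq_true, List.contains_eq_mem,
    List.mem_cons, List.not_mem_nil, or_false, decide_eq_true_eq]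
  constructor
  · intro hall s hs
    exact (cat_active s).mp (((hall (pvCatOf s)).mp ⟨s, hs, rfl⟩))
  · intro hall x
    constructor
    · rintro ⟨s, hs, rfl⟩
      exact (cat_active s).mpr (hall s hs)
    · rintro rfl
      cases xs with
      | nil => exact absurd rfl h
      | cons a t => exact ⟨a, List.mem_cons_self, (cat_active a).mpr (hall a List.mem_cons_self)⟩

lemma cond_shutoff_all (xs : List String) (h : xs ≠ []) :
    PySem.Set.equal (pvCats xs) ["shutoff"] = xs.all (fun status => ["SHUTOFF", "shutoff"].contains status) := by
  rw [Bool.eq_iff_iff, PySem.Set.equal_iff]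
  simp only [pvCats, PySem.Set.mem_ofList, List.mem_map, List.all_eq_true, List.contains_eq_mem,
    List.mem_cons, List.not_mem_nil, or_false, decide_eq_true_eq]
  constructor
  · intro hall s hs
    exact (cat_shutoff s).mp (((hall (pvCatOf s)).mp ⟨s, hs, rfl⟩))
  · intro hall x
    constructor
    · rintro ⟨s, hs, rfl⟩
      exact (cat_shutoff s).mpr (hall s hs)
    · rintro rfl
      cases xs with
      | nil => exact absurd rfl h
      | cons a t => exact ⟨a, List.mem_cons_self, (cat_shutoff a).mpr (hall a List.mem_cons_self)⟩

-- ===== VERDICT (by name: the statement is the Claim_ definition above) =====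
theorem determine_cluster_status_py_spec : Claim_equal_determine_cluster_status_py := by
  intro xs _
  unfold Spec_determine_cluster_status_py determine_cluster_status_py determine_cluster_status_py_alt
  by_cases hx : xs = []
  · subst hx; rfl
  · rw [if_neg hx, if_neg (pvCats_ne_nil xs hx), cond_error, cond_trans, cond_stopping,
      cond_starting, cond_suspended, cond_running xs hx, cond_shutoff_all xs hx, cond_active_any]
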